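-- pv_equiv track=rewrite | github.com/hqyang/BertTest | OntoNotes/f3_correct_span.py | gen_lattices
-- ===== SOURCE A (Python) =====
-- def gen_lattices(start, lens):
--     lattices = []
--     s = 0
--     for ix, ilen in enumerate(lens):
--         e = s
--         for jlen in lens[ix:]:
--             e += jlen
--             lattices.append((start + s, start + e - 1))
--         s += ilen
--     return sorted(lattices)
-- ===== SOURCE B (Python) =====
-- def gen_lattices(start, lens):
--     # Build the prefix-sum table once, then pair every boundary with each later one.
--     cum = [0]
--     s = 0
--     for x in lens:
--         s += x
--         cum.append(s)
--     lattices = []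
--     rest = cum
--     while rest:
--         a = rest[0]
--         rest = rest[1:]
--         for b in rest:
--             lattices.append((start + a, start + b - 1))
--     return sorted(lattices)
-- ===== Notes on version B (the rewrite author's own statement) =====
-- stated objective: alternative
-- what changed: B precomputes the prefix-sum boundary table cum once and then emits a pair for every (earlier, later) boundary by popping heads of the table, instead of A's re-slicing lens[ix:] and threading two running scalar accumulators s and e through nested loops.
import Mathlib
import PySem

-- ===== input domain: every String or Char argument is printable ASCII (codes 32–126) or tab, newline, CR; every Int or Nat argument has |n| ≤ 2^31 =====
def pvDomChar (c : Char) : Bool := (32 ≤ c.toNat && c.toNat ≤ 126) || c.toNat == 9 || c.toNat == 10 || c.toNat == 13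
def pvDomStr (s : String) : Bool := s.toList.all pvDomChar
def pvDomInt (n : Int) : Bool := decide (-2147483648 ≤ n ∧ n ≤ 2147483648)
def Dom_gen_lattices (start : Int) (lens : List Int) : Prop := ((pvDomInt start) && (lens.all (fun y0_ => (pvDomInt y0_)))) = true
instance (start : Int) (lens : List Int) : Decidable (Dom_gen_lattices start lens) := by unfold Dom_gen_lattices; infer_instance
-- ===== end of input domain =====

-- B builds the prefix-sum table once and pairs each boundary with every later one
-- (alternative decomposition; same output including the final sort).

-- ===== PORT A =====
-- A: nested loops threading running scalar sums s (outer) and e (inner over lens[ix:]).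
def gen_lattices (start : Int) (lens : List Int) : List (Int × Int) :=
  let st := (PySem.List.enumerate lens 0).foldl
    (fun (p : List (Int × Int) × Int) ixilen =>
      let inner := (PySem.List.slice lens (some ixilen.1) none).foldl
        (fun (q : List (Int × Int) × Int) jlen =>
          (q.1 ++ [(start + p.2, start + (q.2 + jlen) - 1)], q.2 + jlen)) (p.1, p.2)
      (inner.1, p.2 + ixilen.2)) ([], (0 : Int))
  PySem.List.sorted2 st.1 (fun x => x.1) (fun x => x.2)

-- ===== PORT B =====
-- the while loop of Source B: pop the head boundary, pair it with every later boundary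
def pvPairs (start : Int) : List Int → List (Int × Int)
  | [] => []
  | a :: rest => rest.map (fun b => (start + a, start + b - 1)) ++ pvPairs start rest

def gen_lattices_alt (start : Int) (lens : List Int) : List (Int × Int) :=
  let cum := (lens.foldl (fun (p : List Int × Int) x => (p.1 ++ [p.2 + x], p.2 + x)) ([0], (0 : Int))).1
  PySem.List.sorted2 (pvPairs start cum) (fun x => x.1) (fun x => x.2)

-- ===== PRECONDITION & SPEC =====
def Spec_gen_lattices (start : Int) (lens : List Int) (out : List (Int × Int)) : Prop := out = gen_lattices_alt start lens
instance (start : Int) (lens : List Int) (out : List (Int × Int)) : Decidable (Spec_gen_lattices start lens out) := by unfold Spec_gen_lattices; infer_instance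

-- ===== CLAIM (what is proved, stated in full; the proofs are below) =====
def Claim_equal_gen_lattices : Prop := ∀ (start : Int) (lens : List Int), Dom_gen_lattices start lens → Spec_gen_lattices start lens (gen_lattices start lens)

-- ===== LEMMAS AND PROOFS =====

-- running partial sums s+x1, s+x1+x2, … of a list, starting from s
def pvSums (s : Int) : List Int → List Int
  | [] => []
  | x :: xs => (s + x) :: pvSums (s + x) xs

-- the common unsorted pair list both programs generate
def pvModel (start s : Int) : List Int → List (Int × Int)
  | [] => []
  | x :: xs => ((s + x) :: pvSums (s + x) xs).map (fun e => (start + s, start + e - 1))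
               ++ pvModel start (s + x) xs

-- A's inner loop
theorem pv_inner (start L : Int) : ∀ (l : List Int) (acc : List (Int × Int)) (s : Int),
    l.foldl (fun (q : List (Int × Int) × Int) jlen =>
      (q.1 ++ [(L, start + (q.2 + jlen) - 1)], q.2 + jlen)) (acc, s)
    = (acc ++ (pvSums s l).map (fun e => (L, start + e - 1)), s + l.sum) := by
  intro l
  induction l with
  | nil => intro acc s; simp [pvSums]
  | cons x xs ih =>
      intro acc s
      simp only [List.foldl_cons, ih, pvSums, List.map_cons, List.sum_cons, Prod.mk.injEq]
      exact ⟨by simp, by ring⟩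

-- B's prefix-sum-building loop
theorem pv_cum : ∀ (l : List Int) (c : List Int) (s : Int),
    l.foldl (fun (p : List Int × Int) x => (p.1 ++ [p.2 + x], p.2 + x)) (c, s)
    = (c ++ pvSums s l, s + l.sum) := by
  intro l
  induction l with
  | nil => intro c s; simp [pvSums]
  | cons x xs ih =>
      intro c s
      simp only [List.foldl_cons, ih, pvSums, List.sum_cons, Prod.mk.injEq]
      exact ⟨by simp, by ring⟩

-- B's pairing loop over the prefix-sum table is pvModel
theorem pv_pairs (start : Int) : ∀ (l : List Int) (s : Int),
    pvPairs start (s :: pvSums s l) = pvModel start s l := by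
  intro l
  induction l with
  | nil => intro s; simp [pvSums, pvPairs, pvModel]
  | cons x xs ih =>
      intro s
      simp only [pvSums, pvPairs, pvModel]
      congr 1
      have h := ih (s + x)
      simp only [pvPairs] at h
      exact h

-- A's outer loop over enumerate, with the slice rewritten through the drop hypothesis
theorem pv_outer (start : Int) (lens : List Int) :
    ∀ (r : List Int) (k : Nat) (acc : List (Int × Int)) (s : Int),
    lens.drop k = r →
    (PySem.List.enumerate r (k : Int)).foldl
      (fun (p : List (Int × Int) × Int) ixilen =>
        let inner := (PySem.List.slice lens (some ixilen.1) none).foldl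
          (fun (q : List (Int × Int) × Int) jlen =>
            (q.1 ++ [(start + p.2, start + (q.2 + jlen) - 1)], q.2 + jlen)) (p.1, p.2)
        (inner.1, p.2 + ixilen.2)) (acc, s)
    = (acc ++ pvModel start s r, s + r.sum) := by
  intro r
  induction r with
  | nil => intro k acc s _; simp [PySem.List.enumerate_nil, pvModel]
  | cons x xs ih =>
      intro k acc s hdrop
      rw [PySem.List.enumerate_cons]
      simp only [List.foldl_cons]
      rw [PySem.List.slice_from_natCast, hdrop, pv_inner]
      have hdrop' : lens.drop (k + 1) = xs := by
        have h := congrArg List.tail hdrop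
        rwa [List.tail_drop] at h
      have hcast : ((k : Int) + 1) = ((k + 1 : Nat) : Int) := by push_cast; ring
      rw [hcast, ih (k + 1) _ _ hdrop']
      simp only [pvModel, pvSums, List.sum_cons, List.append_assoc, List.map_cons,
        Prod.mk.injEq]
      exact ⟨trivial, by ring⟩

theorem pv_ports_eq (start : Int) (lens : List Int) :
    gen_lattices start lens = gen_lattices_alt start lens := by
  unfold gen_lattices gen_lattices_alt
  have h1 := pv_outer start lens lens 0 [] 0 rfl
  simp only [Nat.cast_zero] at h1
  rw [h1, pv_cum]
  simp [pv_pairs start lens 0]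

-- ===== VERDICT (by name: the statement is the Claim_ definition above) =====
theorem gen_lattices_spec : Claim_equal_gen_lattices := by
  intro start lens _
  unfold Spec_gen_lattices
  exact pv_ports_eq start lens
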